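-- pv_equiv track=rewrite | github.com/NekoRollex/SW305_Problemas | Backtracking/p20_CD.py | permutaciones_restringidas
-- ===== SOURCE A (Python) =====
-- def permutaciones_restringidas(numeros):
--     resultado = []
--     numeros.sort()
--     n = len(numeros)
--     visitado = [False] * n
--
--     def backtracking(actual):
--         if len(actual) == n:
--             resultado.append(actual[:])
--             return
--
--         for i in range(n):
--             if visitado[i]:
--                 continue
--
--             if i > 0 and numeros[i] == numeros[i - 1] and not visitado[i - 1]:
--                 continue
--
--             if actual and actual[-1] == 1 and numeros[i] == 2:
--                 continue
--
--             visitado[i] = True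
--             actual.append(numeros[i])
--             backtracking(actual)
--             actual.pop()
--             visitado[i] = False
--
--     backtracking([])
--     return resultado
-- ===== SOURCE B (Python) =====
-- # B: pure-functional recursion on the remaining sorted multiset with dict.fromkeys
-- # dedup, instead of A's in-place index backtracking with a visited array.
-- # Like A, it sorts `numeros` in place (same observable mutation).
-- def permutaciones_restringidas(numeros):
--     numeros.sort()
--
--     def build(remaining, last):
--         if not remaining:
--             return [[]]
--         out = []
--         for v in dict.fromkeys(remaining):
--             if last == 1 and v == 2:
--                 continue
--             rest = list(remaining)
--             rest.remove(v)
--             out.extend([v] + tail for tail in build(rest, v))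
--         return out
--
--     return build(numeros, None)
-- ===== Notes on version B (the rewrite author's own statement) =====
-- stated objective: alternative
-- what changed: A's in-place index backtracking over a visited array (with the skip-equal-unvisited-predecessor dedup rule) is replaced by a pure recursion on the remaining sorted multiset that iterates over its distinct values via dict.fromkeys and removes one occurrence per step.
import Mathlib
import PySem

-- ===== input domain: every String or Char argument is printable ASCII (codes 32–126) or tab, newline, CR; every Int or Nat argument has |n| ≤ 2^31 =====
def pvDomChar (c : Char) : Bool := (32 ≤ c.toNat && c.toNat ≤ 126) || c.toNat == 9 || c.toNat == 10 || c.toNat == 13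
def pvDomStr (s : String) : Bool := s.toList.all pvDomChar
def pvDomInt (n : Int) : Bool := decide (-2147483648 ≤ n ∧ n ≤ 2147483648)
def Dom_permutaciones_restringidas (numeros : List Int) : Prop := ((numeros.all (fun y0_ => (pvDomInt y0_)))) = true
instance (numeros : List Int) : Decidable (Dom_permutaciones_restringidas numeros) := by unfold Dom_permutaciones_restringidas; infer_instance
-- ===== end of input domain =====

-- B replaces A's index backtracking over a mutable visited array (with the skip-equal-unvisited-
-- predecessor dedup rule) by a pure recursion on the remaining sorted multiset, iterating over its
-- distinct values (dict.fromkeys) and removing one occurrence per step (objective: alternative).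
-- Both A and B sort `numeros` in place; the equivalence proved here is about the return value.

-- ===== PORT A =====
def aBT (nums : List Int) : Nat → List Bool → List Int → List (List Int)
  | fuel, vis, actual =>
    if actual.length = nums.length then [actual]
    else match fuel with
      | 0 => []
      | fuel + 1 =>
        (PySem.List.pyRange 0 (PySem.List.len nums) 1).foldl (fun resultado i =>
          if PySem.List.pyGetD vis i false = true then resultado
          else if 0 < i ∧ PySem.List.pyGetD nums i 0 = PySem.List.pyGetD nums (i-1) 0 ∧
              PySem.List.pyGetD vis (i-1) false = false then resultado
          else if actual ≠ [] ∧ PySem.List.pyGetD actual (-1) 0 = 1 ∧ PySem.List.pyGetD nums i 0 = 2 then resultado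
          else resultado ++ aBT nums fuel (PySem.List.pySetD vis i true) (actual ++ [PySem.List.pyGetD nums i 0])) []

def permutaciones_restringidas (numeros : List Int) : List (List Int) :=
  let nums := PySem.List.sorted numeros (fun x => x) false
  aBT nums nums.length (List.replicate nums.length false) []


-- ===== PORT B =====
def bBuild : Nat → List Int → Option Int → List (List Int)
  | fuel, remaining, last =>
    if remaining = [] then [[]]
    else match fuel with
      | 0 => []
      | fuel + 1 =>
        (PySem.List.dedup remaining).foldl (fun out v =>
          if last = some 1 ∧ v = 2 then out
          else match PySem.List.remove? remaining v with
            | none => out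
            | some rest => out ++ (bBuild fuel rest (some v)).map (fun tail => v :: tail)) []


def permutaciones_restringidas_alt (numeros : List Int) : List (List Int) :=
  let nums := PySem.List.sorted numeros (fun x => x) false
  bBuild nums.length nums none

-- ===== PRECONDITION & SPEC =====
def Spec_permutaciones_restringidas (numeros : List Int) (out : List (List Int)) : Prop := out = permutaciones_restringidas_alt numeros
instance (numeros : List Int) (out : List (List Int)) : Decidable (Spec_permutaciones_restringidas numeros out) := by unfold Spec_permutaciones_restringidas; infer_instance

-- ===== CLAIM (what is proved, stated in full; the proofs are below) =====
def Claim_equal_permutaciones_restringidas : Prop := ∀ (numeros : List Int), Dom_permutaciones_restringidas numeros → Spec_permutaciones_restringidas numeros (permutaciones_restringidas numeros)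

-- ===== LEMMAS AND PROOFS =====

def resL : List (Int × Bool) → List Int
  | [] => []
  | p :: l => if p.2 then resL l else p.1 :: resL l

def ded : List Int → List Int
  | [] => []
  | v :: xs => v :: (ded xs).filter (fun w => w ≠ v)

lemma mem_ded {xs : List Int} {w : Int} : w ∈ ded xs ↔ w ∈ xs := by
  induction xs with
  | nil => simp [ded]
  | cons v t ih =>
    simp only [ded, List.mem_cons, List.mem_filter]
    constructor
    · rintro (rfl | ⟨h, _⟩)
      · exact Or.inl rfl
      · exact Or.inr (ih.mp h)
    · rintro (rfl | h)
      · exact Or.inl rfl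
      · by_cases hw : w = v
        · exact Or.inl hw
        · exact Or.inr ⟨ih.mpr h, by simp [hw]⟩

lemma ofList_aux (xs : List Int) : ∀ acc : List Int,
    xs.foldl PySem.Set.add acc = acc ++ (ded xs).filter (fun w => !(acc.contains w)) := by
  induction xs with
  | nil => intro acc; simp [ded]
  | cons x t ih =>
    intro acc
    simp only [List.foldl_cons, ih]
    by_cases hx : acc.contains x
    · have : PySem.Set.add acc x = acc := by simp [PySem.Set.add, PySem.Set.contains]; simpa using hx
      rw [this, ded]
      simp only [List.filter_cons]
      rw [if_neg (by simpa [List.contains_iff_mem] using hx), List.filter_filter]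
      congr 1
      apply List.filter_congr
      intro w _
      by_cases hwx : w = x
      · subst hwx; simp at hx ⊢; simp [hx]
      · simp [hwx]
    · have : PySem.Set.add acc x = acc ++ [x] := by simp [PySem.Set.add, PySem.Set.contains]; simpa using hx
      rw [this, ded]
      simp only [List.filter_cons]
      rw [if_pos (by simpa [List.contains_iff_mem] using hx), List.filter_filter]
      simp only [List.append_assoc, List.cons_append, List.nil_append]
      congr 2
      apply List.filter_congr
      intro w _
      by_cases hwx : w = x
      · subst hwx; simp
      · simp [hwx]

lemma dedup_eq_ded (xs : List Int) : PySem.List.dedup xs = ded xs := by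
  rw [PySem.List.dedup_eq_ofList, PySem.Set.ofList_eq_foldl, ofList_aux]
  simp

lemma getD_zip (nums : List Int) (vis : List Bool) (k : Nat)
    (hk : k < nums.length) (hlen : vis.length = nums.length) :
    (nums.zip vis).getD k (0, false) = (nums.getD k 0, vis.getD k false) := by
  have h1 : k < (nums.zip vis).length := by simp [List.length_zip, hlen]; omega
  rw [List.getD_eq_getElem _ _ h1, List.getD_eq_getElem _ _ hk,
    List.getD_eq_getElem _ _ (by omega : k < vis.length), List.getElem_zip]

lemma zip_set (nums : List Int) (vis : List Bool) (k : Nat) (b : Bool)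
    (hk : k < nums.length) (hlen : vis.length = nums.length) :
    nums.zip (vis.set k b) = (nums.zip vis).set k (nums.getD k 0, b) := by
  induction nums generalizing vis k with
  | nil => simp at hk
  | cons x t ih =>
    cases vis with
    | nil => simp at hlen
    | cons c cs =>
      cases k with
      | zero => simp [List.set]
      | succ j =>
        simp only [List.set, List.zip_cons_cons, List.getD_cons_succ]
        rw [ih cs j (by simpa using hk) (by simpa using hlen)]

lemma mem_resL {l : List (Int × Bool)} {w : Int} :
    w ∈ resL l → ∃ p, p ∈ l ∧ p.1 = w ∧ p.2 = false := by
  induction l with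
  | nil => simp [resL]
  | cons p t ih =>
    simp only [resL]
    by_cases hp : p.2
    · rw [if_pos hp]; intro h
      obtain ⟨q, hq, h1, h2⟩ := ih h
      exact ⟨q, List.mem_cons_of_mem _ hq, h1, h2⟩
    · rw [if_neg hp]
      intro h
      rcases List.mem_cons.mp h with h | h
      · exact ⟨p, List.mem_cons_self, h.symm, by simpa using hp⟩
      · obtain ⟨q, hq, h1, h2⟩ := ih h
        exact ⟨q, List.mem_cons_of_mem _ hq, h1, h2⟩

lemma resL_set (l : List (Int × Bool)) : ∀ (k : Nat) (v : Int),
    k < l.length → l.getD k (0, false) = (v, false) →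
    (∀ j, j < k → (l.getD j (0, false)).1 ≠ v ∨ (l.getD j (0, false)).2 = true) →
    resL (l.set k (v, true)) = (resL l).erase v := by
  induction l with
  | nil => intro k v hk; simp at hk
  | cons p t ih =>
    intro k v hk hcur hfirst
    cases k with
    | zero =>
      simp only [List.getD_cons_zero] at hcur
      subst hcur
      simp [List.set, resL, List.erase_cons_head]
    | succ j =>
      simp only [List.getD_cons_succ] at hcur
      have h0 := hfirst 0 (Nat.succ_pos j)
      simp only [List.getD_cons_zero] at h0
      simp only [List.set, resL]
      by_cases hp : p.2
      · rw [if_pos hp, if_pos hp]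
        exact ih j v (by simpa using hk) hcur
          (fun m hm => by simpa using hfirst (m+1) (by omega))
      · rw [if_neg hp, if_neg hp]
        have hne : p.1 ≠ v := by
          rcases h0 with h | h
          · exact h
          · exact absurd h (by simpa using hp)
        rw [List.erase_cons_tail (by simp [hne])]
        rw [ih j v (by simpa using hk) hcur (fun m hm => by simpa using hfirst (m+1) (by omega))]

lemma length_resL_set (l : List (Int × Bool)) (k : Nat) (v : Int)
    (hk : k < l.length) (hcur : l.getD k (0, false) = (v, false)) :
    ((resL l).erase v).length + 1 = (resL l).length := by
  have hv : v ∈ resL l := by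
    induction l generalizing k with
    | nil => simp at hk
    | cons p t ih =>
      cases k with
      | zero =>
        simp only [List.getD_cons_zero] at hcur
        subst hcur
        simp [resL]
      | succ j =>
        simp only [List.getD_cons_succ] at hcur
        have := ih j (by simpa using hk) hcur
        simp only [resL]
        split <;> simp [this]
  rw [List.length_erase_of_mem hv]
  have : 0 < (resL l).length := List.length_pos_of_mem hv
  omega

lemma last_cond_iff (actual : List Int) :
    (actual ≠ [] ∧ PySem.List.pyGetD actual (-1) 0 = 1) ↔ actual.getLast? = some 1 := by
  by_cases h : actual = []
  · subst h; simp
  · rw [PySem.List.pyGetD_neg_one actual 0 h, List.getLast?_eq_some_getLast h]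
    simp [h]

lemma resL_zip_replicate (nums : List Int) :
    resL (nums.zip (List.replicate nums.length false)) = nums := by
  induction nums with
  | nil => rfl
  | cons x t ih => simpa [List.replicate, resL] using ih

lemma flatMap_filter {α β : Type} (l : List α) (p : α → Bool) (G : α → List β)
    (h : ∀ x ∈ l, p x = false → G x = []) :
    l.flatMap G = (l.filter p).flatMap G := by
  induction l with
  | nil => rfl
  | cons x t ih =>
    simp only [List.flatMap_cons, List.filter_cons]
    by_cases hx : p x
    · rw [if_pos hx, List.flatMap_cons, ih (fun y hy => h y (List.mem_cons_of_mem _ hy))]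
    · rw [if_neg hx, h x List.mem_cons_self (by simpa using hx),
        ih (fun y hy => h y (List.mem_cons_of_mem _ hy))]
      simp

def blockedB : Option (Int × Bool) → Int → Bool
  | some q, v => q.1 == v && !q.2
  | none, _ => false

def allowedVals : Option (Int × Bool) → List (Int × Bool) → List Int
  | _, [] => []
  | prev, p :: l =>
    (if p.2 = false ∧ blockedB prev p.1 = false then [p.1] else []) ++ allowedVals (some p) l

def okN (prev : Option (Int × Bool)) (l : List (Int × Bool)) (k : Nat) : Bool :=
  !(l.getD k (0, false)).2 &&
    !(blockedB (if k = 0 then prev else some (l.getD (k-1) (0, false))) (l.getD k (0, false)).1)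

lemma allowedFirst (l : List (Int × Bool)) (k : Nat) (v : Int)
    (hS : l.Pairwise (fun p q => p.1 ≤ q.1))
    (hC : l.IsChain (fun p q => p.1 = q.1 → q.2 = true → p.2 = true))
    (hk : k < l.length) (hcur : l.getD k (0, false) = (v, false))
    (hok : k = 0 ∨ blockedB (some (l.getD (k-1) (0, false))) v = false) :
    ∀ j, j < k → (l.getD j (0, false)).1 ≠ v ∨ (l.getD j (0, false)).2 = true := by
  intro j hj
  by_contra hcon
  push Not at hcon
  obtain ⟨hjv, hjb⟩ := hcon
  have hjlen : j < l.length := by omega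
  have hk0 : k ≠ 0 := by omega
  rcases hok with h | hblk
  · exact hk0 h
  rw [List.getD_eq_getElem _ _ hk] at hcur
  rw [List.getD_eq_getElem _ _ hjlen] at hjv hjb
  rw [List.getD_eq_getElem _ _ (by omega : k-1 < l.length)] at hblk
  have hjb' : (l[j]'hjlen).2 = false := by cases h : (l[j]'hjlen).2 <;> simp_all
  have hkv : (l[k]'hk).1 = v := by rw [hcur]
  have hsort := List.pairwise_iff_getElem.mp hS
  have hchain := List.isChain_iff_getElem.mp hC
  have hval : ∀ m (hm : m < l.length), j ≤ m → m ≤ k → (l[m]'hm).1 = v := by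
    intro m hm h1 h2
    have hle1 : (l[j]'hjlen).1 ≤ (l[m]'hm).1 := by
      rcases Nat.eq_or_lt_of_le h1 with rfl | h
      · rfl
      · exact hsort j m hjlen hm h
    have hle2 : (l[m]'hm).1 ≤ (l[k]'hk).1 := by
      rcases Nat.eq_or_lt_of_le h2 with rfl | h
      · rfl
      · exact hsort m k hm hk h
    rw [hjv] at hle1; rw [hkv] at hle2; omega
  have hflag : ∀ m (h1 : j ≤ m) (h2 : m < k), (l[m]'(Nat.lt_trans h2 hk)).2 = false := by
    intro m h1
    induction m, h1 using Nat.le_induction with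
    | base => intro _; exact hjb'
    | succ e he ih =>
      intro hd
      have h1 := ih (by omega)
      have hch := hchain e (by omega)
      have hv1 : (l[e]'(by omega)).1 = v := hval _ _ (by omega) (by omega)
      have hv2 : (l[e+1]'(by omega)).1 = v := hval _ _ (by omega) (by omega)
      cases h2 : (l[e+1]'(by omega)).2
      · rfl
      · exfalso
        have := hch (hv1.trans hv2.symm) h2
        rw [h1] at this
        exact absurd this (by simp)
  have hlast : (l[k-1]'(by omega)).1 = v := hval (k-1) (by omega) (by omega) (by omega)
  have hlastb : (l[k-1]'(by omega)).2 = false := hflag (k-1) (by omega) (by omega)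
  simp [blockedB, hlast, hlastb] at hblk

lemma invS_set (l : List (Int × Bool)) (k : Nat) (v : Int)
    (hk : k < l.length) (hcur : l.getD k (0, false) = (v, false))
    (hS : l.Pairwise (fun p q => p.1 ≤ q.1)) :
    (l.set k (v, true)).Pairwise (fun p q => p.1 ≤ q.1) := by
  rw [List.getD_eq_getElem _ _ hk] at hcur
  rw [List.pairwise_iff_getElem] at hS ⊢
  intro i j hi hj hij
  simp only [List.length_set] at hi hj
  by_cases hik : i = k <;> by_cases hjk : j = k
  · omega
  · subst hik
    rw [List.getElem_set_self (by simpa using hk), List.getElem_set_ne (by omega)]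
    have := hS i j hk (by omega) (by omega)
    rw [hcur] at this
    exact this
  · subst hjk
    rw [List.getElem_set_self (by simpa using hk), List.getElem_set_ne (by omega)]
    have := hS i j (by omega) hk (by omega)
    rw [hcur] at this
    exact this
  · rw [List.getElem_set_ne (by omega), List.getElem_set_ne (by omega)]
    exact hS i j (by omega) (by omega) hij

lemma invC_set (l : List (Int × Bool)) (k : Nat) (v : Int)
    (hk : k < l.length) (hcur : l.getD k (0, false) = (v, false))
    (hok : k = 0 ∨ blockedB (some (l.getD (k-1) (0, false))) v = false)
    (hC : l.IsChain (fun p q => p.1 = q.1 → q.2 = true → p.2 = true)) :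
    (l.set k (v, true)).IsChain (fun p q => p.1 = q.1 → q.2 = true → p.2 = true) := by
  rw [List.getD_eq_getElem _ _ hk] at hcur
  rw [List.isChain_iff_getElem] at hC ⊢
  intro i hi
  simp only [List.length_set] at hi
  by_cases hik : i = k
  · subst hik
    rw [List.getElem_set_self (by simpa using hk), List.getElem_set_ne (by omega : i ≠ i + 1)]
    intro _ _
    rfl
  · by_cases hik1 : i + 1 = k
    · subst hik1
      rw [List.getElem_set_ne (by omega), List.getElem_set_self (by simp; omega)]
      intro hv _
      rcases hok with h | hblk
      · omega
      · rw [List.getD_eq_getElem _ _ (by omega : i + 1 - 1 < l.length)] at hblk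
        simp only [Nat.add_sub_cancel] at hblk
        simp only [blockedB, Bool.and_eq_false_iff] at hblk
        rcases hblk with h | h
        · simp only [beq_eq_false_iff_ne, ne_eq] at h
          exact absurd (by simpa using hv) h
        · simpa using h
    · rw [List.getElem_set_ne (by omega), List.getElem_set_ne (by omega : k ≠ i + 1)]
      exact hC i (by omega)

lemma okN_succ (prev : Option (Int × Bool)) (p : Int × Bool) (t : List (Int × Bool)) (k : Nat) :
    okN prev (p :: t) (k+1) = okN (some p) t k := by
  cases k <;> simp [okN]

lemma okN_zero (prev : Option (Int × Bool)) (p : Int × Bool) (t : List (Int × Bool)) :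
    okN prev (p :: t) 0 = (!p.2 && !(blockedB prev p.1)) := by
  simp [okN]

lemma filterIdx (l : List (Int × Bool)) : ∀ prev,
    ((List.range l.length).filter (okN prev l)).map (fun k => (l.getD k (0, false)).1)
      = allowedVals prev l := by
  induction l with
  | nil => intro prev; simp [allowedVals]
  | cons p t ih =>
    intro prev
    rw [List.length_cons, List.range_succ_eq_map, List.filter_cons]
    have hfun : okN prev (p :: t) ∘ Nat.succ = okN (some p) t := funext (okN_succ prev p t)
    have hmap : ((fun k => ((p :: t).getD k (0, false)).1) ∘ Nat.succ)
        = (fun k => (t.getD k (0, false)).1) := funext fun k => by simp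
    by_cases h0 : okN prev (p :: t) 0 = true
    · rw [if_pos h0, List.map_cons, List.filter_map, hfun, List.map_map, hmap, ih (some p)]
      rw [okN_zero] at h0
      simp only [Bool.and_eq_true, Bool.not_eq_true'] at h0
      simp [allowedVals, h0.1, h0.2]
    · rw [if_neg h0, List.filter_map, hfun, List.map_map, hmap, ih (some p)]
      rw [okN_zero] at h0
      simp only [Bool.and_eq_true, Bool.not_eq_true', not_and_or] at h0
      rcases h0 with h | h
      · simp only [allowedVals]
        rw [if_neg (by simp [Bool.not_eq_false] at h; simp [h])]
        simp
      · simp only [allowedVals]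
        rw [if_neg (by simp [Bool.not_eq_false] at h; simp [h])]
        simp

lemma resL_lb (t : List (Int × Bool)) (v : Int) (h : ∀ r ∈ t, v ≤ r.1) :
    ∀ w ∈ resL t, v ≤ w := by
  intro w hw
  obtain ⟨q, hq, h1, _⟩ := mem_resL hw
  exact h1 ▸ h q hq

lemma key (l : List (Int × Bool)) : ∀ prev,
    l.Pairwise (fun p q => p.1 ≤ q.1) →
    l.IsChain (fun p q => p.1 = q.1 → q.2 = true → p.2 = true) →
    (∀ q, prev = some q → ∀ r ∈ l, q.1 ≤ r.1) →
    (∀ q r, prev = some q → l.head? = some r → (q.1 = r.1 → r.2 = true → q.2 = true)) →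
    allowedVals prev l = (ded (resL l)).filter (fun v => !(blockedB prev v)) := by
  induction l with
  | nil => intro prev _ _ _ _; simp [allowedVals, resL, ded]
  | cons p t ih =>
    intro prev hS hC hle hch
    obtain ⟨hle0, hSt⟩ := List.pairwise_cons.mp hS
    have hCt : t.IsChain (fun p q => p.1 = q.1 → q.2 = true → p.2 = true) := hC.of_cons
    have hle' : ∀ q, some p = some q → ∀ r ∈ t, q.1 ≤ r.1 := by
      rintro q hq r hr; cases hq; exact hle0 r hr
    have hch' : ∀ q r, some p = some q → t.head? = some r → (q.1 = r.1 → r.2 = true → q.2 = true) := by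
      rintro q r hq hr; cases hq
      cases t with
      | nil => simp at hr
      | cons r' t' => cases (by simpa using hr : r' = r); exact hC.rel
    have IH := ih (some p) hSt hCt hle' hch'
    have hres_lb : ∀ w ∈ resL t, p.1 ≤ w := resL_lb t p.1 hle0
    obtain ⟨v, b⟩ := p
    cases b
    · -- head unvisited: resL ((v,false) :: t) = v :: resL t
      have e1 : resL ((v, false) :: t) = v :: resL t := by simp [resL]
      have e2 : ded (v :: resL t) = v :: (ded (resL t)).filter (fun w => decide (w ≠ v)) := rfl
      by_cases hblk : blockedB prev v = true
      · -- prev = some (v, false); head value blocked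
        have hprev : prev = some (v, false) := by
          cases prev with
          | none => simp [blockedB] at hblk
          | some q =>
            obtain ⟨pv, pb⟩ := q
            simp only [blockedB, Bool.and_eq_true, beq_iff_eq, Bool.not_eq_true'] at hblk
            rw [hblk.1, hblk.2]
        subst hprev
        have e3 : allowedVals (some (v, false)) ((v, false) :: t)
            = allowedVals (some (v, false)) t := by
          simp [allowedVals, hblk]
        rw [e3, e1, e2, IH, List.filter_cons]
        rw [if_neg (by simp [hblk]), List.filter_filter]
        apply List.filter_congr
        intro w _
        by_cases hw : w = v <;> simp [blockedB, hw]
      · have hblk' : blockedB prev v = false := by simpa using hblk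
        have e3 : allowedVals prev ((v, false) :: t)
            = v :: allowedVals (some (v, false)) t := by
          simp [allowedVals, hblk']
        rw [e3, e1, e2, IH, List.filter_cons]
        rw [if_pos (by simp [hblk']), List.filter_filter]
        congr 1
        apply List.filter_congr
        intro w hw
        by_cases hwv : w = v
        · simp [blockedB, hwv]
        · have hblkw : blockedB prev w = false := by
            cases prev with
            | none => rfl
            | some q =>
              obtain ⟨pv, pb⟩ := q
              cases pb with
              | true => simp [blockedB]
              | false =>
                have hpv : pv ≠ v := by simpa [blockedB] using hblk'
                have hpvle : pv ≤ v := hle (pv, false) rfl (v, false) List.mem_cons_self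
                have hvw : v ≤ w := hres_lb w (mem_ded.mp hw)
                simp only [blockedB, Bool.and_eq_false_iff]
                left
                simp only [beq_eq_false_iff_ne, ne_eq]
                omega
          simp [blockedB, hwv]
          rw [show (v == w) = false from by simp [Ne.symm hwv]]
          exact hblkw.symm
    · -- head visited: resL ((v,true) :: t) = resL t
      have e1 : resL ((v, true) :: t) = resL t := by simp [resL]
      have e3 : allowedVals prev ((v, true) :: t) = allowedVals (some (v, true)) t := by
        simp [allowedVals]
      rw [e3, e1, IH]
      have h1 : (ded (resL t)).filter (fun w => !(blockedB (some (v, true)) w)) = ded (resL t) := by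
        apply List.filter_eq_self.mpr
        intro w _
        simp [blockedB]
      rw [h1]
      symm
      apply List.filter_eq_self.mpr
      intro w hw
      cases prev with
      | none => rfl
      | some q =>
        obtain ⟨pv, pb⟩ := q
        cases pb with
        | true => simp [blockedB]
        | false =>
          have hpv : pv ≠ v := by
            intro h
            exact absurd (hch (pv, false) (v, true) rfl rfl (by simpa using h) rfl) (by simp)
          have hpvle : pv ≤ v := hle (pv, false) rfl (v, true) List.mem_cons_self
          have hvw : v ≤ w := hres_lb w (mem_ded.mp hw)
          simp only [blockedB, Bool.not_eq_true', Bool.and_eq_false_iff]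
          left
          simp only [beq_eq_false_iff_ne, ne_eq]
          omega

lemma okN_zip_zero (nums : List Int) (vis : List Bool)
    (h0 : 0 < nums.length) (hlen : vis.length = nums.length) :
    okN none (nums.zip vis) 0 = !(vis.getD 0 false) := by
  simp only [okN, getD_zip nums vis 0 h0 hlen, blockedB]
  simp

lemma okN_zip_succ (nums : List Int) (vis : List Bool) (j : Nat)
    (hj : j + 1 < nums.length) (hlen : vis.length = nums.length) :
    okN none (nums.zip vis) (j+1)
      = (!(vis.getD (j+1) false) &&
          !((nums.getD j 0 == nums.getD (j+1) 0) && !(vis.getD j false))) := by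
  simp only [okN, if_neg (Nat.succ_ne_zero j), Nat.add_sub_cancel,
    getD_zip nums vis (j+1) hj hlen, getD_zip nums vis j (by omega) hlen, blockedB]

lemma aBT_succ (nums : List Int) (vis : List Bool) (actual : List Int) (fuel : Nat)
    (hlen : vis.length = nums.length) (hne : actual.length ≠ nums.length) :
    aBT nums (fuel+1) vis actual =
      (List.range nums.length).flatMap (fun k =>
        if okN none (nums.zip vis) k = true then
          (if actual.getLast? = some 1 ∧ nums.getD k 0 = 2 then []
           else aBT nums fuel (vis.set k true) (actual ++ [nums.getD k 0]))
        else []) := by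
  rw [aBT, if_neg hne]
  have hrange : PySem.List.pyRange 0 (PySem.List.len nums) 1
      = List.map (fun (k : Nat) => (k : Int)) (List.range nums.length) := by
    rw [PySem.List.pyRange_one]
    simp only [sub_zero, zero_add, PySem.List.len_eq, Int.toNat_natCast]
  rw [hrange, List.foldl_map]
  rw [PySem.List.foldl_congr_mem' (List.range nums.length) _
    (fun acc k => acc ++ (if okN none (nums.zip vis) k = true then
        (if actual.getLast? = some 1 ∧ nums.getD k 0 = 2 then []
         else aBT nums fuel (vis.set k true) (actual ++ [nums.getD k 0]))
      else [])) [] ?_]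
  · rw [PySem.List.foldl_append_eq_flatMap, List.nil_append]
  intro k hk acc
  have hkn : k < nums.length := List.mem_range.mp hk
  simp only [PySem.List.pyGetD_natCast, PySem.List.pySetD_natCast]
  by_cases h1 : vis.getD k false = true
  · rw [if_pos h1]
    have hok : okN none (nums.zip vis) k = false := by
      simp only [okN, Bool.and_eq_false_iff, getD_zip nums vis k hkn hlen]
      left
      show (!(vis.getD k false)) = false
      rw [h1]
      rfl
    rw [hok]
    simp
  · rw [if_neg h1]
    have h1' : vis.getD k false = false := by simpa using h1
    cases k with
    | zero =>
      have hok : okN none (nums.zip vis) 0 = true := by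
        rw [okN_zip_zero nums vis (by omega) hlen, h1']
        rfl
      have hc : ¬((0:Int) < ((0:Nat):Int) ∧ nums.getD 0 0 = PySem.List.pyGetD nums (((0:Nat):Int) - 1) 0 ∧ PySem.List.pyGetD vis (((0:Nat):Int) - 1) false = false) := by
        simp
      rw [if_neg hc, hok, if_pos rfl]
      by_cases h3 : actual ≠ [] ∧ PySem.List.pyGetD actual (-1) 0 = 1 ∧ nums.getD 0 0 = 2
      · rw [if_pos h3, if_pos ⟨(last_cond_iff actual).mp ⟨h3.1, h3.2.1⟩, h3.2.2⟩]
        simp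
      · rw [if_neg h3]
        rw [if_neg (by
          intro hcon
          exact h3 ⟨((last_cond_iff actual).mpr hcon.1).1, ((last_cond_iff actual).mpr hcon.1).2, hcon.2⟩)]
    | succ j =>
      have hcast : ((j+1 : Nat) : Int) - 1 = ((j : Nat) : Int) := by push_cast; ring
      rw [hcast]
      simp only [PySem.List.pyGetD_natCast]
      have hokeq := okN_zip_succ nums vis j hkn hlen
      by_cases h2 : nums.getD (j+1) 0 = nums.getD j 0 ∧ vis.getD j false = false
      · rw [if_pos ⟨by exact_mod_cast Nat.succ_pos j, h2.1, h2.2⟩]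
        have hok : okN none (nums.zip vis) (j+1) = false := by
          rw [hokeq, h2.1, h2.2]
          simp
        rw [hok]
        simp
      · rw [if_neg (by
          intro hcon
          exact h2 ⟨hcon.2.1, hcon.2.2⟩)]
        have hok : okN none (nums.zip vis) (j+1) = true := by
          rw [hokeq, h1']
          rcases (not_and_or.mp h2) with h | h
          · rw [show (nums.getD j 0 == nums.getD (j+1) 0) = false from
              beq_eq_false_iff_ne.mpr (fun hc => h hc.symm)]
            rfl
          · rw [show vis.getD j false = true from by simpa using h]
            simp
        rw [hok, if_pos rfl]
        by_cases h3 : actual ≠ [] ∧ PySem.List.pyGetD actual (-1) 0 = 1 ∧ nums.getD (j+1) 0 = 2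
        · rw [if_pos h3, if_pos ⟨(last_cond_iff actual).mp ⟨h3.1, h3.2.1⟩, h3.2.2⟩]
          simp
        · rw [if_neg h3]
          rw [if_neg (by
            intro hcon
            exact h3 ⟨((last_cond_iff actual).mpr hcon.1).1, ((last_cond_iff actual).mpr hcon.1).2, hcon.2⟩)]

lemma ML (nums : List Int) : ∀ (fuel : Nat) (vis : List Bool) (actual : List Int),
    vis.length = nums.length →
    (nums.zip vis).Pairwise (fun p q => p.1 ≤ q.1) →
    (nums.zip vis).IsChain (fun p q => p.1 = q.1 → q.2 = true → p.2 = true) →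
    actual.length + (resL (nums.zip vis)).length = nums.length →
    aBT nums fuel vis actual
      = (bBuild fuel (resL (nums.zip vis)) actual.getLast?).map (fun t => actual ++ t) := by
  intro fuel
  induction fuel with
  | zero =>
    intro vis actual hlen hS hC hcnt
    rw [aBT, bBuild]
    by_cases hl : actual.length = nums.length
    · have hres : resL (nums.zip vis) = [] :=
        List.eq_nil_of_length_eq_zero (by omega)
      rw [if_pos hl, hres, if_pos rfl]
      simp
    · rw [if_neg hl]
      have hres : resL (nums.zip vis) ≠ [] := by
        intro h
        rw [h] at hcnt
        simp at hcnt
        omega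
      rw [if_neg hres]
      simp
  | succ fuel ih =>
    intro vis actual hlen hS hC hcnt
    by_cases hl : actual.length = nums.length
    · rw [aBT, bBuild]
      have hres : resL (nums.zip vis) = [] :=
        List.eq_nil_of_length_eq_zero (by omega)
      rw [if_pos hl, hres, if_pos rfl]
      simp
    · have hzlen : (nums.zip vis).length = nums.length := by
        rw [List.length_zip, hlen, min_self]
      have hresne : resL (nums.zip vis) ≠ [] := by
        intro h
        rw [h] at hcnt
        simp at hcnt
        omega
      -- the common value both sides reduce to
      set H : Int → List (List Int) := fun v =>
        if actual.getLast? = some 1 ∧ v = 2 then []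
        else (bBuild fuel ((resL (nums.zip vis)).erase v) (some v)).map
          (fun t => actual ++ v :: t) with hH
      have hL : aBT nums (fuel+1) vis actual = (ded (resL (nums.zip vis))).flatMap H := by
        rw [aBT_succ nums vis actual fuel hlen hl]
        rw [show List.range nums.length = List.range (nums.zip vis).length from by rw [hzlen]]
        rw [flatMap_filter _ (okN none (nums.zip vis)) _ (by
          intro k _ hok
          rw [hok]
          simp)]
        have hcong : ∀ k ∈ (List.range (nums.zip vis).length).filter (okN none (nums.zip vis)),
            (if okN none (nums.zip vis) k = true then
              (if actual.getLast? = some 1 ∧ nums.getD k 0 = 2 then []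
               else aBT nums fuel (vis.set k true) (actual ++ [nums.getD k 0]))
             else [])
              = H (((nums.zip vis).getD k (0, false)).1) := by
          intro k hk
          obtain ⟨hkr, hok⟩ := List.mem_filter.mp hk
          have hkzl : k < (nums.zip vis).length := List.mem_range.mp hkr
          have hkn : k < nums.length := by omega
          have hzk : (nums.zip vis).getD k (0, false) = (nums.getD k 0, vis.getD k false) :=
            getD_zip nums vis k hkn hlen
          have hok2 : (!((nums.zip vis).getD k (0, false)).2) = true ∧
              (!(blockedB (if k = 0 then none else some ((nums.zip vis).getD (k-1) (0, false)))
                ((nums.zip vis).getD k (0, false)).1)) = true := by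
            rw [okN] at hok
            exact Bool.and_eq_true_iff.mp hok
          obtain ⟨hcur2, hblk⟩ := hok2
          have hvisk : vis.getD k false = false := by
            rw [hzk] at hcur2
            simpa using hcur2
          have hcurzl : (nums.zip vis).getD k (0, false) = (nums.getD k 0, false) := by
            rw [hzk, hvisk]
          have hok' : k = 0 ∨ blockedB (some ((nums.zip vis).getD (k-1) (0, false)))
              (nums.getD k 0) = false := by
            cases k with
            | zero => exact Or.inl rfl
            | succ j =>
              right
              rw [if_neg (Nat.succ_ne_zero j)] at hblk
              rw [hzk] at hblk
              simpa using hblk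
          have hfirst := allowedFirst (nums.zip vis) k (nums.getD k 0) hS hC hkzl hcurzl hok'
          have hzipset : nums.zip (vis.set k true) = (nums.zip vis).set k (nums.getD k 0, true) :=
            zip_set nums vis k true hkn hlen
          have hresset : resL ((nums.zip vis).set k (nums.getD k 0, true))
              = (resL (nums.zip vis)).erase (nums.getD k 0) :=
            resL_set (nums.zip vis) k (nums.getD k 0) hkzl hcurzl hfirst
          have hcntres := length_resL_set (nums.zip vis) k (nums.getD k 0) hkzl hcurzl
          have ihk := ih (vis.set k true) (actual ++ [nums.getD k 0])
            (by rw [List.length_set]; exact hlen)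
            (by rw [hzipset]; exact invS_set _ k _ hkzl hcurzl hS)
            (by rw [hzipset]; exact invC_set _ k _ hkzl hcurzl hok' hC)
            (by
              rw [hzipset, hresset, List.length_append]
              simp only [List.length_cons, List.length_nil]
              omega)
          rw [if_pos hok, ihk, hzipset, hresset, List.getLast?_concat, hH]
          have hmapeq : (fun t => (actual ++ [nums.getD k 0]) ++ t)
              = fun t => actual ++ nums.getD k 0 :: t :=
            funext fun t => (List.append_cons actual (nums.getD k 0) t).symm
          rw [hmapeq, hzk]
        rw [List.flatMap_congr hcong]
        rw [show (List.flatMap (fun k => H (((nums.zip vis).getD k (0, false)).1))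
            ((List.range (nums.zip vis).length).filter (okN none (nums.zip vis))))
          = (((List.range (nums.zip vis).length).filter (okN none (nums.zip vis))).map
              (fun k => (((nums.zip vis).getD k (0, false)).1))).flatMap H from
          (List.flatMap_map _ _ _).symm]
        rw [filterIdx (nums.zip vis) none]
        rw [key (nums.zip vis) none hS hC (by rintro q ⟨⟩) (by rintro q r ⟨⟩)]
        rw [show (fun v => !(blockedB none v)) = fun (_ : Int) => true from funext fun v => rfl]
        rw [List.filter_true]
      have hR : bBuild (fuel+1) (resL (nums.zip vis)) actual.getLast?
          = (ded (resL (nums.zip vis))).flatMap (fun v =>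
              if actual.getLast? = some 1 ∧ v = 2 then []
              else (bBuild fuel ((resL (nums.zip vis)).erase v) (some v)).map
                (fun tail => v :: tail)) := by
        rw [bBuild, if_neg hresne, dedup_eq_ded]
        rw [PySem.List.foldl_congr_mem' (ded (resL (nums.zip vis))) _
          (fun out v => out ++ (if actual.getLast? = some 1 ∧ v = 2 then []
            else (bBuild fuel ((resL (nums.zip vis)).erase v) (some v)).map
              (fun tail => v :: tail))) [] (by
          intro v hv out
          have hvmem : v ∈ resL (nums.zip vis) := mem_ded.mp hv
          rw [PySem.List.remove?_eq_some_erase _ v hvmem]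
          by_cases hc : actual.getLast? = some 1 ∧ v = 2
          · simp [hc]
          · simp [hc])]
        rw [PySem.List.foldl_append_eq_flatMap, List.nil_append]
      rw [hL, hR, List.map_flatMap]
      apply List.flatMap_congr
      intro v _
      by_cases hc : actual.getLast? = some 1 ∧ v = 2
      · rw [hH]
        simp only [if_pos hc]
        simp
      · rw [hH]
        simp only [if_neg hc, List.map_map]
        rfl

lemma ports_agree (numeros : List Int) :
    aBT (PySem.List.sorted numeros (fun x => x) false)
        (PySem.List.sorted numeros (fun x => x) false).length
        (List.replicate (PySem.List.sorted numeros (fun x => x) false).length false) []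
      = bBuild (PySem.List.sorted numeros (fun x => x) false).length
          (PySem.List.sorted numeros (fun x => x) false) none := by
  set nums := PySem.List.sorted numeros (fun x => x) false with hnums
  have hpw : nums.Pairwise (fun a b => a ≤ b) := PySem.List.sorted_pairwise numeros (fun x => x)
  have hzl : (nums.zip (List.replicate nums.length false)).length = nums.length := by
    simp
  have hS : (nums.zip (List.replicate nums.length false)).Pairwise (fun p q => p.1 ≤ q.1) := by
    rw [List.pairwise_iff_getElem] at hpw ⊢
    intro i j hi hj hij
    simp only [List.getElem_zip]
    exact hpw i j (by omega) (by omega) hij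
  have hC : (nums.zip (List.replicate nums.length false)).IsChain
      (fun p q => p.1 = q.1 → q.2 = true → p.2 = true) := by
    rw [List.isChain_iff_getElem]
    intro i hi
    simp only [List.getElem_zip, List.getElem_replicate]
    intro _ h
    exact absurd h (by simp)
  have h := ML nums nums.length (List.replicate nums.length false) []
    (by simp) hS hC (by rw [resL_zip_replicate]; simp)
  rw [h, resL_zip_replicate]
  simp

-- ===== VERDICT (by name: the statement is the Claim_ definition above) =====
theorem permutaciones_restringidas_spec : Claim_equal_permutaciones_restringidas := by
  intro numeros _
  unfold Spec_permutaciones_restringidas permutaciones_restringidas permutaciones_restringidas_alt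
  exact ports_agree numeros
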